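-- pv_equiv track=rewrite | github.com/Aakash0902/Text-Analysis-Toolkit | printedWords.py | printedWords
-- ===== SOURCE A (Python) =====
-- def printedWords(words):
--     years = set()
--     for word in words.values():
--         years.update(word.keys())
--     sorted_years = sorted(years)
--     result = []
--     for year in sorted_years:
--         total_count = sum(word_data.get(year, 0) for word_data in words.values())
--         result.append((year, total_count))
--     return result
-- ===== SOURCE B (Python) =====
-- def printedWords(words):
--     totals = {}
--     for word_data in words.values():
--         for year, count in word_data.items():
--             totals[year] = totals.get(year, 0) + count
--     return sorted(totals.items(), key=lambda item: item[0])
-- ===== Notes on version B (the rewrite author's own statement) =====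
-- stated objective: faster
-- what changed: Instead of collecting the year set and then re-scanning every word's dict once per year (Y*W lookups), B makes a single pass over all (year, count) pairs accumulating per-year totals in one dict, then sorts the totals' items by year.
import Mathlib
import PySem

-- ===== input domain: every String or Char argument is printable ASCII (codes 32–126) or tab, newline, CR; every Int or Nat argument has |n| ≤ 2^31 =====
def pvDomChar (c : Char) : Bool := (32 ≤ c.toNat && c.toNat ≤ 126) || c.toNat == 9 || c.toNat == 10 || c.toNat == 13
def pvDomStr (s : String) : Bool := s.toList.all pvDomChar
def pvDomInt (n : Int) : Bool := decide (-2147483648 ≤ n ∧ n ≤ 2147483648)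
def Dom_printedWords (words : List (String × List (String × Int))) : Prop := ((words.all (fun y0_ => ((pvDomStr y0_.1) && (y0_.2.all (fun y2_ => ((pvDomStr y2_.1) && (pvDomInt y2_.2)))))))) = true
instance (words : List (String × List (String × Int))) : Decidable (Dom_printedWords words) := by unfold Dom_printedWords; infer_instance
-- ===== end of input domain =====

-- B replaces A's per-year re-scan of every word (Y*W dict lookups) by one pass accumulating
-- per-year totals in a dict, then sorting the items by year (objective: faster, asymptotic).


-- ===== PORT A =====
def printedWords (words : List (String × List (String × Int))) : List (String × Int) :=
  -- years = set(); for word in words.values(): years.update(word.keys())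
  let years : PySem.Set String :=
    words.foldl (fun s w => PySem.Set.update s (w.2.map Prod.fst)) PySem.Set.empty
  -- sorted_years = sorted(years)
  let sortedYears := PySem.List.sorted years (fun y => y)
  -- for year in sorted_years: result.append((year, sum(word_data.get(year, 0) for word_data in words.values())))
  sortedYears.foldl
    (fun result year =>
      result ++ [(year, words.foldl (fun acc w => acc + (PySem.Dict.mk w.2).getD year 0) 0)])
    []

-- ===== PORT B =====
def printedWords_alt (words : List (String × List (String × Int))) : List (String × Int) :=
  -- totals = {}; for word_data in words.values(): for year, count in word_data.items(): totals[year] = totals.get(year, 0) + count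
  let totals : PySem.Dict String Int :=
    words.foldl
      (fun t w => w.2.foldl (fun t p => t.insert p.1 (t.getD p.1 0 + p.2)) t)
      PySem.Dict.empty
  -- return sorted(totals.items(), key=lambda item: item[0])
  PySem.List.sorted totals.items (fun item => item.1)

-- ===== PRECONDITION & SPEC =====
-- Pre_ excludes association lists in which some word's inner year list repeats a key: such a
-- list cannot arise from a Python dict (dicts have unique keys), and on it A's first-match
-- lookup and B's sum over all pairs are both accidental.
def Pre_printedWords (words : List (String × List (String × Int))) : Prop :=
  ∀ w ∈ words, (w.2.map Prod.fst).Nodup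
instance (words : List (String × List (String × Int))) : Decidable (Pre_printedWords words) := by
  unfold Pre_printedWords; infer_instance
def pvWitness_printedWords : (List (String × List (String × Int))) :=
  [("cat", [("1990", 2), ("2000", 3)]), ("dog", [("1990", 1)])]
def Spec_printedWords (words : List (String × List (String × Int))) (out : List (String × Int)) : Prop := out = printedWords_alt words
instance (words : List (String × List (String × Int))) (out : List (String × Int)) : Decidable (Spec_printedWords words out) := by unfold Spec_printedWords; infer_instance

-- ===== CLAIM (what is proved, stated in full; the proofs are below) =====
def Claim_equal_printedWords : Prop := ∀ (words : List (String × List (String × Int))), Dom_printedWords words → Pre_printedWords words → Spec_printedWords words (printedWords words)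

-- ===== LEMMAS AND PROOFS =====

-- the year set A collects, as a plain foldl over the input
def pvYears (words : List (String × List (String × Int))) : PySem.Set String :=
  words.foldl (fun s w => PySem.Set.update s (w.2.map Prod.fst)) PySem.Set.empty

-- the per-word contribution to year y: sum of the values stored under y in that word's list
def pvContrib (y : String) (w : String × List (String × Int)) : Int :=
  ((w.2.filter (fun p => p.1 == y)).map Prod.snd).sum

-- B's accumulation step
def pvStep (t : PySem.Dict String Int) (w : String × List (String × Int)) : PySem.Dict String Int :=
  w.2.foldl (fun t p => t.insert p.1 (t.getD p.1 0 + p.2)) t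

lemma pvYears_nodup (words : List (String × List (String × Int))) : (pvYears words).Nodup := by
  unfold pvYears
  generalize hs : (PySem.Set.empty : PySem.Set String) = s
  have hn : s.Nodup := by rw [← hs]; exact List.nodup_nil
  clear hs
  induction words generalizing s with
  | nil => simpa using hn
  | cons w ws ih => exact ih _ (PySem.Set.nodup_update _ _ hn)

lemma pvKeys_step (words : List (String × List (String × Int)))
    (t : PySem.Dict String Int) :
    (words.foldl pvStep t).keys
      = words.foldl (fun s w => PySem.Set.update s (w.2.map Prod.fst)) t.keys := by
  induction words generalizing t with
  | nil => rfl
  | cons w ws ih =>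
      simp only [List.foldl_cons, ih]
      congr 1
      simpa using PySem.Dict.keys_foldl_insert_key w.2 (fun p => p.1)
        (fun d p => d.getD p.1 0 + p.2) t

-- getD after the inner accumulation loop: old value plus the sum of matching pairs
lemma pvGetD_inner (l : List (String × Int)) (t : PySem.Dict String Int) (y : String) :
    (l.foldl (fun t p => t.insert p.1 (t.getD p.1 0 + p.2)) t).getD y 0
      = t.getD y 0 + ((l.filter (fun p => p.1 == y)).map Prod.snd).sum := by
  induction l generalizing t with
  | nil => simp
  | cons p l ih =>
      simp only [List.foldl_cons, ih, List.filter_cons]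
      by_cases h : p.1 = y
      · simp [h, add_assoc]
      · simp [PySem.Dict.getD_insert, h, Ne.symm h]

lemma pvGetD_outer (words : List (String × List (String × Int)))
    (t : PySem.Dict String Int) (y : String) :
    (words.foldl pvStep t).getD y 0 = t.getD y 0 + (words.map (pvContrib y)).sum := by
  induction words generalizing t with
  | nil => simp
  | cons w ws ih =>
      simp only [List.foldl_cons, ih, pvStep, pvGetD_inner, pvContrib, List.map_cons,
        List.sum_cons, add_assoc]

-- A's lookup in one word's raw list equals that word's contribution, given unique inner keys
lemma pvGetD_raw (l : List (String × Int)) (y : String) (h : (l.map Prod.fst).Nodup) :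
    (PySem.Dict.mk l).getD y 0 = ((l.filter (fun p => p.1 == y)).map Prod.snd).sum := by
  induction l with
  | nil => simp [PySem.Dict.getD, PySem.Dict.get?]
  | cons p l ih =>
      simp only [List.map_cons, List.nodup_cons] at h
      by_cases hy : p.1 = y
      · have hnil : l.filter (fun p => p.1 == y) = [] := by
          rw [List.filter_eq_nil_iff]
          intro q hq hqy
          exact h.1 (by rw [hy, ← eq_of_beq hqy]; exact List.mem_map_of_mem hq)
        simp [PySem.Dict.getD, PySem.Dict.get?, hy, hnil]
      · have := ih h.2
        simp only [PySem.Dict.getD, PySem.Dict.get?] at this ⊢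
        simp [List.filter_cons, hy, this]

-- ===== VERDICT (by name: the statement is the Claim_ definition above) =====
theorem printedWords_spec : Claim_equal_printedWords := by
  intro words _hdom hpre
  show printedWords words = printedWords_alt words
  unfold printedWords printedWords_alt
  simp only [PySem.List.foldl_append_singleton_eq_map, List.nil_append]
  -- name the pieces
  set T := words.foldl pvStep PySem.Dict.empty with hT
  have hty : ∀ y, T.getD y 0 = (words.map (pvContrib y)).sum := by
    intro y; rw [hT, pvGetD_outer]; simp
  have hkeys : T.keys = pvYears words := by
    rw [hT, pvKeys_step]; rfl
  have hknd : T.keys.Nodup := by rw [hkeys]; exact pvYears_nodup words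
  -- A's per-year sum is the total
  have hsum : ∀ y, words.foldl (fun acc w => acc + (PySem.Dict.mk w.2).getD y 0) 0
      = (words.map (pvContrib y)).sum := by
    intro y
    rw [PySem.List.foldl_add words (fun w => (PySem.Dict.mk w.2).getD y 0) 0]
    simp only [zero_add]
    congr 1
    exact List.map_congr_left (fun w hw => pvGetD_raw w.2 y (hpre w hw))
  -- B's items are the keys paired with their totals
  have hitems : T.items = T.keys.map (fun k => (k, (words.map (pvContrib k)).sum)) := by
    rw [PySem.Dict.items_eq_map_keys T hknd 0]
    exact List.map_congr_left (fun k _ => by rw [hty k])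
  -- the sorted-years map is a strictly key-increasing rearrangement of B's items
  have hperm : ((PySem.List.sorted (pvYears words) (fun y => y)).map
      (fun y => (y, (words.map (pvContrib y)).sum))).Perm T.items := by
    rw [hitems, hkeys]
    exact (PySem.List.sorted_perm (pvYears words) (fun y => y) false).map _
  have hpw : ((PySem.List.sorted (pvYears words) (fun y => y)).map
      (fun y => (y, (words.map (pvContrib y)).sum))).Pairwise
      (fun a b => (fun item => item.1) a < (fun item => item.1) b) := by
    refine List.Pairwise.map _ (fun a b h => h) ?_
    have hle := PySem.List.sorted_pairwise (pvYears words) (fun y => y)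
    have hnd : (PySem.List.sorted (pvYears words) (fun y => y)).Nodup :=
      (PySem.List.sorted_perm (pvYears words) (fun y => y) false).nodup_iff.mpr
        (pvYears_nodup words)
    exact hle.imp₂ (fun a b hab hne => lt_of_le_of_ne hab hne) hnd
  calc (PySem.List.sorted (pvYears words) (fun y => y)).map
        (fun y => (y, words.foldl (fun acc w => acc + (PySem.Dict.mk w.2).getD y 0) 0))
      = (PySem.List.sorted (pvYears words) (fun y => y)).map
        (fun y => (y, (words.map (pvContrib y)).sum)) := by
        exact List.map_congr_left (fun y _ => by rw [hsum y])
    _ = PySem.List.sorted T.items (fun item => item.1) :=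
        (PySem.List.sorted_eq_of_perm_of_pairwise_lt _ _ _ hperm hpw).symm
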